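-- pv_equiv track=rewrite | github.com/SJTU-xihe/multi-player-game-ai-project | agents/ai_bots/gomoku_minimax_bot.py | _line_has_opponent_live_three
-- ===== SOURCE A (Python) =====
-- def _line_has_opponent_live_three(line, player, target_idx):
--     """检查线段是否包含对手的活三，并且目标位置能够阻断它"""
--     if target_idx < 0 or target_idx >= len(line):
--         return False
--
--     # 标准化线段：对手棋子=1，空位=0，我方棋子=-1
--     normalized = []
--     for cell in line:
--         if cell == player:
--             normalized.append(1)
--         elif cell == 0:
--             normalized.append(0)
--         else:
--             normalized.append(-1)
--
--     # 检查标准活三模式 [0,1,1,1,0]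
--     for i in range(len(normalized) - 4):
--         if normalized[i:i+5] == [0, 1, 1, 1, 0]:
--             # 检查目标位置是否在活三的空位上
--             if target_idx == i or target_idx == i + 4:
--                 return True
--
--     return False
-- ===== SOURCE B (Python) =====
-- def _line_has_opponent_live_three(line, player, target_idx):
--     n = len(line)
--     if target_idx < 0 or target_idx >= n:
--         return False
--
--     def blockable_window(i):
--         # [empty, opp, opp, opp, empty] with 'empty' = cell==0 and cell!=player
--         return (0 <= i and i + 4 < n
--                 and line[i] == 0 and line[i] != player
--                 and line[i + 1] == player and line[i + 2] == player and line[i + 3] == player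
--                 and line[i + 4] == 0 and line[i + 4] != player)
--
--     # target_idx can only block as the left (i = target_idx) or right (i = target_idx - 4) empty end
--     return blockable_window(target_idx) or blockable_window(target_idx - 4)
-- ===== Notes on version B (the rewrite author's own statement) =====
-- stated objective: faster
-- what changed: Instead of building a normalized copy of the whole line and scanning every 5-cell window for [0,1,1,1,0], B directly tests only the two windows in which target_idx can be an empty end of the pattern (i = target_idx and i = target_idx - 4), reading the original cells.
import Mathlib
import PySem

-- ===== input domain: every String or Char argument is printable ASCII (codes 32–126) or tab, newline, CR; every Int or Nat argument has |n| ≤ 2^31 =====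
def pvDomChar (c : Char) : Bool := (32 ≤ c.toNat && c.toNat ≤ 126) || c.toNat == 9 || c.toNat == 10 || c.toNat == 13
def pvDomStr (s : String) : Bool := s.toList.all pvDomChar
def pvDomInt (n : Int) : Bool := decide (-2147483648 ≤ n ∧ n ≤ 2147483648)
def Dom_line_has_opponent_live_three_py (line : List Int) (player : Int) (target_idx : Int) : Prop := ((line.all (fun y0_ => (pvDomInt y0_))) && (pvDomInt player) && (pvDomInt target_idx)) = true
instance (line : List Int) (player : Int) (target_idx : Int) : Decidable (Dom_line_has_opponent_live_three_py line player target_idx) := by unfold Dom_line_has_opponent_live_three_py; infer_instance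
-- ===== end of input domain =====

-- B replaces A's normalize-then-scan of every window by a direct O(1) test of the only two
-- windows in which target_idx can be an empty end of the [0,1,1,1,0] pattern (objective: simpler).

-- ===== PORT A =====
def line_has_opponent_live_three_py (line : List Int) (player : Int) (target_idx : Int) : Bool :=
  if target_idx < 0 ∨ target_idx ≥ (line.length : Int) then false
  else
    let normalized : List Int := line.foldl (fun acc cell =>
      acc ++ [if cell = player then (1 : Int) else if cell = 0 then 0 else -1]) []
    (PySem.List.pyRange 0 ((normalized.length : Int) - 4) 1).any (fun i =>
      decide (PySem.List.slice normalized (some i) (some (i + 5)) = [0, 1, 1, 1, 0]) &&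
      (decide (target_idx = i) || decide (target_idx = i + 4)))

-- ===== PORT B =====
-- helper of B: the window at position i; every index read is guarded in range by the
-- preceding bound checks, so pyGetD's default 0 is never the value actually compared.
def pvWindowB (line : List Int) (player : Int) (i : Int) : Bool :=
  decide (0 ≤ i) && decide (i + 4 < (line.length : Int)) &&
  decide (PySem.List.pyGetD line i 0 = 0) && !decide (PySem.List.pyGetD line i 0 = player) &&
  decide (PySem.List.pyGetD line (i + 1) 0 = player) &&
  decide (PySem.List.pyGetD line (i + 2) 0 = player) &&
  decide (PySem.List.pyGetD line (i + 3) 0 = player) &&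
  decide (PySem.List.pyGetD line (i + 4) 0 = 0) && !decide (PySem.List.pyGetD line (i + 4) 0 = player)

def line_has_opponent_live_three_py_alt (line : List Int) (player : Int) (target_idx : Int) : Bool :=
  if target_idx < 0 ∨ (line.length : Int) ≤ target_idx then false
  else pvWindowB line player target_idx || pvWindowB line player (target_idx - 4)

-- ===== PRECONDITION & SPEC =====
def Spec_line_has_opponent_live_three_py (line : List Int) (player : Int) (target_idx : Int) (out : Bool) : Prop := out = line_has_opponent_live_three_py_alt line player target_idx
instance (line : List Int) (player : Int) (target_idx : Int) (out : Bool) : Decidable (Spec_line_has_opponent_live_three_py line player target_idx out) := by unfold Spec_line_has_opponent_live_three_py; infer_instance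

-- ===== CLAIM (what is proved, stated in full; the proofs are below) =====
def Claim_equal_line_has_opponent_live_three_py : Prop := ∀ (line : List Int) (player : Int) (target_idx : Int), Dom_line_has_opponent_live_three_py line player target_idx → Spec_line_has_opponent_live_three_py line player target_idx (line_has_opponent_live_three_py line player target_idx)

-- ===== LEMMAS AND PROOFS =====

-- A's normalization function
def pvNorm (player cell : Int) : Int :=
  if cell = player then 1 else if cell = 0 then 0 else -1

lemma pvNorm_eq_zero_iff (player cell : Int) : pvNorm player cell = 0 ↔ cell = 0 ∧ cell ≠ player := by
  unfold pvNorm; split_ifs with h1 h2 <;> simp_all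

lemma pvNorm_eq_one_iff (player cell : Int) : pvNorm player cell = 1 ↔ cell = player := by
  unfold pvNorm; split_ifs with h1 h2 <;> simp_all

-- five consecutive elements of a drop/take window
lemma take5_drop (xs : List Int) (j : Nat) (h : j + 4 < xs.length) :
    (xs.drop j).take 5 = [xs[j], xs[j+1], xs[j+2], xs[j+3], xs[j+4]] := by
  apply List.ext_getElem (by simp; omega)
  intro n h1 h2
  simp only [List.length_take, List.length_drop] at h1
  rw [List.getElem_take, List.getElem_drop]
  have hn5 : n < 5 := by omega
  interval_cases n <;> simp

-- A's window condition (with its range bound) is exactly B's window test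
lemma goodA_iff_windowB (line : List Int) (player i : Int) :
    (0 ≤ i ∧ i < (line.length : Int) - 4 ∧
      PySem.List.slice (line.map (pvNorm player)) (some i) (some (i + 5)) = [0, 1, 1, 1, 0])
    ↔ pvWindowB line player i = true := by
  unfold pvWindowB
  by_cases h0 : 0 ≤ i
  · by_cases h4 : i + 4 < (line.length : Int)
    · obtain ⟨j, rfl⟩ : ∃ j : Nat, i = (j : Int) := ⟨i.toNat, (Int.toNat_of_nonneg h0).symm⟩
      have hj : j + 4 < line.length := by exact_mod_cast (by omega : (j : Int) + 4 < (line.length : Int))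
      have hcast : ((j : Int) + 5) = ((j + 5 : Nat) : Int) := by push_cast; ring
      rw [hcast, PySem.List.slice_natCast]
      simp only [Nat.add_sub_cancel_left]
      rw [take5_drop _ j (by simpa using hj)]
      have g0 := PySem.List.pyGetD_eq_getElem (xs := line) (i := (j:Int)) (d := 0) h0 (by omega)
      have g1 := PySem.List.pyGetD_eq_getElem (xs := line) (i := (j:Int)+1) (d := 0) (by omega) (by omega)
      have g2 := PySem.List.pyGetD_eq_getElem (xs := line) (i := (j:Int)+2) (d := 0) (by omega) (by omega)
      have g3 := PySem.List.pyGetD_eq_getElem (xs := line) (i := (j:Int)+3) (d := 0) (by omega) (by omega)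
      have g4 := PySem.List.pyGetD_eq_getElem (xs := line) (i := (j:Int)+4) (d := 0) (by omega) (by omega)
      have e1 : ((j:Int)+1).toNat = j + 1 := by omega
      have e2 : ((j:Int)+2).toNat = j + 2 := by omega
      have e3 : ((j:Int)+3).toNat = j + 3 := by omega
      have e4 : ((j:Int)+4).toNat = j + 4 := by omega
      simp only [e1] at g1; simp only [e2] at g2; simp only [e3] at g3; simp only [e4] at g4
      simp only [g0, g1, g2, g3, g4, Int.toNat_natCast, List.getElem_map] at *
      constructor
      · rintro ⟨-, -, hs⟩
        rw [List.cons.injEq, List.cons.injEq, List.cons.injEq, List.cons.injEq,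
            List.cons.injEq] at hs
        obtain ⟨a0, a1, a2, a3, a4, -⟩ := hs
        rw [pvNorm_eq_zero_iff] at a0 a4
        rw [pvNorm_eq_one_iff] at a1 a2 a3
        have hp : ¬(0 : Int) = player := fun h => a0.2 (a0.1.trans h)
        simp [h0, h4, a0.1, a1, a2, a3, a4.1, hp]
      · intro hb
        simp only [Bool.and_eq_true, decide_eq_true_eq, Bool.not_eq_true',
          decide_eq_false_iff_not] at hb
        obtain ⟨⟨⟨⟨⟨⟨⟨⟨-, -⟩, b0⟩, b0'⟩, b1⟩, b2⟩, b3⟩, b4⟩, b4'⟩ := hb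
        refine ⟨h0, by omega, ?_⟩
        simp only [List.cons.injEq, and_true]
        exact ⟨(pvNorm_eq_zero_iff _ _).2 ⟨b0, b0'⟩, (pvNorm_eq_one_iff _ _).2 b1,
          (pvNorm_eq_one_iff _ _).2 b2, (pvNorm_eq_one_iff _ _).2 b3,
          (pvNorm_eq_zero_iff _ _).2 ⟨b4, b4'⟩⟩
    · constructor
      · rintro ⟨-, hlt, -⟩; omega
      · intro hb; simp only [Bool.and_eq_true, decide_eq_true_eq] at hb; exact absurd hb.1.1.1.1.1.1.1.2 h4
  · constructor
    · rintro ⟨h, -⟩; exact absurd h h0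
    · intro hb; simp only [Bool.and_eq_true, decide_eq_true_eq] at hb; exact absurd hb.1.1.1.1.1.1.1.1 h0

-- ===== VERDICT (by name: the statement is the Claim_ definition above) =====
theorem line_has_opponent_live_three_py_spec : Claim_equal_line_has_opponent_live_three_py := by
  intro line player target_idx _
  unfold Spec_line_has_opponent_live_three_py line_has_opponent_live_three_py line_has_opponent_live_three_py_alt
  by_cases hg : target_idx < 0 ∨ target_idx ≥ (line.length : Int)
  · rw [if_pos hg, if_pos (by omega : target_idx < 0 ∨ (line.length : Int) ≤ target_idx)]
  · rw [if_neg hg, if_neg (by omega : ¬(target_idx < 0 ∨ (line.length : Int) ≤ target_idx))]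
    rw [PySem.List.foldl_append_singleton_eq_map]
    have hfun : (fun cell => if cell = player then (1 : Int) else if cell = 0 then 0 else -1)
        = pvNorm player := rfl
    rw [hfun]
    simp only [List.nil_append, List.length_map]
    rw [Bool.eq_iff_iff, List.any_eq_true, Bool.or_eq_true]
    constructor
    · rintro ⟨i, hmem, hi⟩
      rw [PySem.List.mem_pyRange_one] at hmem
      simp only [Bool.and_eq_true, decide_eq_true_eq, Bool.or_eq_true] at hi
      obtain ⟨hs, ht⟩ := hi
      rcases ht with rfl | h4
      · exact Or.inl ((goodA_iff_windowB line player target_idx).1 ⟨hmem.1, hmem.2, hs⟩)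
      · refine Or.inr ((goodA_iff_windowB line player (target_idx - 4)).1 ?_)
        have : target_idx - 4 = i := by omega
        rw [this]; exact ⟨hmem.1, hmem.2, hs⟩
    · intro h
      rcases h with hw | hw
      · obtain ⟨h0, hlt, hs⟩ := (goodA_iff_windowB line player target_idx).2 hw
        exact ⟨target_idx, (PySem.List.mem_pyRange_one).2 ⟨h0, hlt⟩,
          by simp [hs]⟩
      · obtain ⟨h0, hlt, hs⟩ := (goodA_iff_windowB line player (target_idx - 4)).2 hw
        exact ⟨target_idx - 4, (PySem.List.mem_pyRange_one).2 ⟨h0, hlt⟩,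
          by simp [hs]⟩
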